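-- pv_equiv track=rewrite | github.com/jovvtan/RailWatch-Demo | backend/app/services/dtl_sector_lookup.py | detect_bound
-- ===== SOURCE A (Python) =====
-- XB_SEGMENTS: list[tuple[int, int, str]] = [
--     (55794, 56431, "GBD-BKP"),
--     (54684, 55580, "BKP-CSW"),
--     (53649, 54216, "CSW-HVW"),
--     (51174, 53496, "HVW-BTW"),
--     (49874, 50859, "BTW-KAP"),
--     (48249, 49604, "KAP-SAV"),
--     (47527, 47624, "SAV-TKK"),
--     (45832, 46650, "TKK-BTN"),
--     (44836, 45561, "BTN-STV"),
--     (43066, 44508, "STV-NEW"),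
--     (41660, 42911, "NEW-LTI"),
--     (41180, 41497, "LTI-RCR"),
--     (40316, 40952, "RCR-BGS"),
--     (39468, 40021, "BGS-PMN"),
--     (38194, 39223, "PMN-BFT"),
--     (37242, 37767, "BFT-DTN"),
--     (36792, 37053, "DTN-TLA"),
--     (36029, 36452, "CLA-CNT"),
--     (35068, 35856, "CNT-FCN"),
--     (33996, 34791, "FCN-BCL"),
--     (33037, 33632, "BCL-JLB"),
--     (31903, 32206, "JLB-BDM"),
--     (30590, 31642, "BDM-GLB"),
--     (28773, 30138, "GLB-MTR"),
--     (27934, 28473, "MTR-MPS"),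
--     (26837, 27690, "MPS-UBI"),
--     (25658, 26571, "UBI-KKB"),
--     (24757, 25406, "KKB-BDN"),
--     (22698, 24234, "BDN-BDR"),
--     (20917, 22449, "BDR-TPW"),
--     (19609, 20734, "TPW-TAM"),
--     (18383, 19426, "TAM-TPE"),
--     (16090, 18032, "TPE-UPC"),
--     (14696, 15160, "UPC-XPO"),
-- ]
--
-- BB_SEGMENTS: list[tuple[int, int, str]] = [
--     (14695, 15180, "XPO-UPC"),
--     (16095, 18009, "UPC-TPE"),
--     (18371, 19434, "TPE-TAM"),
--     (19601, 20724, "TAM-TPW"),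
--     (20909, 22487, "TPW-BDR"),
--     (22697, 24161, "BDR-BDN"),
--     (24787, 25405, "BDN-KKB"),
--     (25679, 26478, "KKB-UBI"),
--     (26385, 27768, "UBI-MPS"),
--     (27910, 28500, "MPS-MTR"),
--     (28768, 30118, "MTR-GLB"),
--     (30468, 31653, "GLB-BDM"),
--     (31937, 32908, "BDM-JLB"),
--     (33035, 33688, "JLB-BCL"),
--     (33995, 34790, "BCL-FCN"),
--     (35064, 35848, "FCN-CNT"),
--     (36030, 36462, "CNT-CLA"),
--     (36794, 37055, "TLA-DTN"),
--     (37231, 37768, "DTN-BFT"),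
--     (38193, 39224, "BFT-PMN"),
--     (39461, 40031, "PMN-BGS"),
--     (40361, 40933, "BGS-RCR"),
--     (41150, 41279, "RCR-LTI"),
--     (41640, 42914, "LTI-NEW"),
--     (43060, 44509, "NEW-STV"),
--     (44706, 45310, "STV-BTN"),
--     (45802, 46664, "BTN-TKK"),
--     (47052, 47612, "TKK-SAV"),
--     (48229, 49630, "SAV-KAP"),
--     (49841, 50872, "KAP-BTW"),
--     (51152, 53508, "BTW-HVW"),
--     (53648, 54303, "HVW-CSW"),
--     (54679, 55581, "CSW-BKP"),
--     (56001, 56543, "BKP-GBD"),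
-- ]
--
-- def detect_bound(chainage: int) -> str | None:
--     """Determine if a chainage belongs to XB or BB based on its range."""
--     for lo, hi, _ in XB_SEGMENTS:
--         if lo <= chainage <= hi:
--             return "XB"
--     for lo, hi, _ in BB_SEGMENTS:
--         if lo <= chainage <= hi:
--             return "BB"
--     return None
-- ===== SOURCE B (Python) =====
-- # Precomputed boundary tables for binary search: for each bound, the raw
-- # (overlapping) segments were sorted and coalesced into disjoint inclusive
-- # intervals [lo, hi]; each interval contributes the two boundaries lo and
-- # hi + 1, so a chainage lies inside the bound exactly when the number of
-- # boundaries <= chainage is odd.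
--
-- XB_POINTS: list[int] = [14696, 15161, 16090, 18033, 18383, 19427, 19609, 20735, 20917, 22450, 22698, 24235, 24757, 25407, 25658, 26572, 26837, 27691, 27934, 28474, 28773, 30139, 30590, 31643, 31903, 32207, 33037, 33633, 33996, 34792, 35068, 35857, 36029, 36453, 36792, 37054, 37242, 37768, 38194, 39224, 39468, 40022, 40316, 40953, 41180, 41498, 41660, 42912, 43066, 44509, 44836, 45562, 45832, 46651, 47527, 47625, 48249, 49605, 49874, 50860, 51174, 53497, 53649, 54217, 54684, 55581, 55794, 56432]
--
-- BB_POINTS: list[int] = [14695, 15181, 16095, 18010, 18371, 19435, 19601, 20725, 20909, 22488, 22697, 24162, 24787, 25406, 25679, 27769, 27910, 28501, 28768, 30119, 30468, 31654, 31937, 32909, 33035, 33689, 33995, 34791, 35064, 35849, 36030, 36463, 36794, 37056, 37231, 37769, 38193, 39225, 39461, 40032, 40361, 40934, 41150, 41280, 41640, 42915, 43060, 44510, 44706, 45311, 45802, 46665, 47052, 47613, 48229, 49631, 49841, 50873, 51152, 53509, 53648, 54304, 54679, 55582, 56001, 56544]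
--
--
-- def _bisect_right(points: list[int], x: int) -> int:
--     """Index of the first element > x in a sorted list (hand-rolled bisect)."""
--     lo, hi = 0, len(points)
--     while lo < hi:
--         mid = (lo + hi) // 2
--         if x < points[mid]:
--             hi = mid
--         else:
--             lo = mid + 1
--     return lo
--
--
-- def detect_bound(chainage: int) -> str | None:
--     """Determine if a chainage belongs to XB or BB based on its range."""
--     if _bisect_right(XB_POINTS, chainage) % 2 == 1:
--         return "XB"
--     if _bisect_right(BB_POINTS, chainage) % 2 == 1:
--         return "BB"
--     return None
-- ===== Notes on version B (the rewrite author's own statement) =====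
-- stated objective: alternative
-- what changed: B replaces A's linear scans over the raw overlapping segment lists with binary search over precomputed sorted boundary tables (merged disjoint intervals flattened to lo/hi+1 points; membership = odd bisect parity).
import Mathlib
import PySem

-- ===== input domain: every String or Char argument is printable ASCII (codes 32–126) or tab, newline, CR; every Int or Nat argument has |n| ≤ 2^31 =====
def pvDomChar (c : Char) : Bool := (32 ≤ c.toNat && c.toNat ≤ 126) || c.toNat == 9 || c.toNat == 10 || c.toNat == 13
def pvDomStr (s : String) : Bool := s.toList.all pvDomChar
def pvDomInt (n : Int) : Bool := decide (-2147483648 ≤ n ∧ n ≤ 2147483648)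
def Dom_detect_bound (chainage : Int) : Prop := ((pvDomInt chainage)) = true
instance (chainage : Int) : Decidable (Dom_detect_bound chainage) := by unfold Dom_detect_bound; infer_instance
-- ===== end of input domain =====

-- B answers by binary search over precomputed sorted boundary tables (merged disjoint
-- intervals flattened to lo / hi+1 points) instead of A's linear scans (objective: alternative).

-- ===== PORT A =====
def pyXB_SEGMENTS : List (Int × Int × String) := [(55794, 56431, "GBD-BKP"),
  (54684, 55580, "BKP-CSW"),
  (53649, 54216, "CSW-HVW"),
  (51174, 53496, "HVW-BTW"),
  (49874, 50859, "BTW-KAP"),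
  (48249, 49604, "KAP-SAV"),
  (47527, 47624, "SAV-TKK"),
  (45832, 46650, "TKK-BTN"),
  (44836, 45561, "BTN-STV"),
  (43066, 44508, "STV-NEW"),
  (41660, 42911, "NEW-LTI"),
  (41180, 41497, "LTI-RCR"),
  (40316, 40952, "RCR-BGS"),
  (39468, 40021, "BGS-PMN"),
  (38194, 39223, "PMN-BFT"),
  (37242, 37767, "BFT-DTN"),
  (36792, 37053, "DTN-TLA"),
  (36029, 36452, "CLA-CNT"),
  (35068, 35856, "CNT-FCN"),
  (33996, 34791, "FCN-BCL"),
  (33037, 33632, "BCL-JLB"),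
  (31903, 32206, "JLB-BDM"),
  (30590, 31642, "BDM-GLB"),
  (28773, 30138, "GLB-MTR"),
  (27934, 28473, "MTR-MPS"),
  (26837, 27690, "MPS-UBI"),
  (25658, 26571, "UBI-KKB"),
  (24757, 25406, "KKB-BDN"),
  (22698, 24234, "BDN-BDR"),
  (20917, 22449, "BDR-TPW"),
  (19609, 20734, "TPW-TAM"),
  (18383, 19426, "TAM-TPE"),
  (16090, 18032, "TPE-UPC"),
  (14696, 15160, "UPC-XPO")]

def pyBB_SEGMENTS : List (Int × Int × String) := [(14695, 15180, "XPO-UPC"),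
  (16095, 18009, "UPC-TPE"),
  (18371, 19434, "TPE-TAM"),
  (19601, 20724, "TAM-TPW"),
  (20909, 22487, "TPW-BDR"),
  (22697, 24161, "BDR-BDN"),
  (24787, 25405, "BDN-KKB"),
  (25679, 26478, "KKB-UBI"),
  (26385, 27768, "UBI-MPS"),
  (27910, 28500, "MPS-MTR"),
  (28768, 30118, "MTR-GLB"),
  (30468, 31653, "GLB-BDM"),
  (31937, 32908, "BDM-JLB"),
  (33035, 33688, "JLB-BCL"),
  (33995, 34790, "BCL-FCN"),
  (35064, 35848, "FCN-CNT"),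
  (36030, 36462, "CNT-CLA"),
  (36794, 37055, "TLA-DTN"),
  (37231, 37768, "DTN-BFT"),
  (38193, 39224, "BFT-PMN"),
  (39461, 40031, "PMN-BGS"),
  (40361, 40933, "BGS-RCR"),
  (41150, 41279, "RCR-LTI"),
  (41640, 42914, "LTI-NEW"),
  (43060, 44509, "NEW-STV"),
  (44706, 45310, "STV-BTN"),
  (45802, 46664, "BTN-TKK"),
  (47052, 47612, "TKK-SAV"),
  (48229, 49630, "SAV-KAP"),
  (49841, 50872, "KAP-BTW"),
  (51152, 53508, "BTW-HVW"),
  (53648, 54303, "HVW-CSW"),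
  (54679, 55581, "CSW-BKP"),
  (56001, 56543, "BKP-GBD")]

-- 'for lo, hi, _ in segs: if lo <= chainage <= hi: return res' as structural recursion
def pyLoopRet (segs : List (Int × Int × String)) (res : String) (chainage : Int) : Option String :=
  match segs with
  | [] => none
  | (lo, hi, _) :: rest =>
    if lo ≤ chainage ∧ chainage ≤ hi then some res else pyLoopRet rest res chainage

def detect_bound (chainage : Int) : Option String :=
  match pyLoopRet pyXB_SEGMENTS "XB" chainage with
  | some s => some s
  | none => pyLoopRet pyBB_SEGMENTS "BB" chainage

-- ===== PORT B =====
-- Source B's precomputed boundary tables, as literals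
def xbPoints : List Int := [14696, 15161, 16090, 18033, 18383, 19427, 19609, 20735, 20917, 22450, 22698, 24235, 24757, 25407, 25658, 26572, 26837, 27691, 27934, 28474, 28773, 30139, 30590, 31643, 31903, 32207, 33037, 33633, 33996, 34792, 35068, 35857, 36029, 36453, 36792, 37054, 37242, 37768, 38194, 39224, 39468, 40022, 40316, 40953, 41180, 41498, 41660, 42912, 43066, 44509, 44836, 45562, 45832, 46651, 47527, 47625, 48249, 49605, 49874, 50860, 51174, 53497, 53649, 54217, 54684, 55581, 55794, 56432]

def bbPoints : List Int := [14695, 15181, 16095, 18010, 18371, 19435, 19601, 20725, 20909, 22488, 22697, 24162, 24787, 25406, 25679, 27769, 27910, 28501, 28768, 30119, 30468, 31654, 31937, 32909, 33035, 33689, 33995, 34791, 35064, 35849, 36030, 36463, 36794, 37056, 37231, 37769, 38193, 39225, 39461, 40032, 40361, 40934, 41150, 41280, 41640, 42915, 43060, 44510, 44706, 45311, 45802, 46665, 47052, 47613, 48229, 49631, 49841, 50873, 51152, 53509, 53648, 54304, 54679, 55582, 56001, 56544]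

-- Source B's _bisect_right while-loop (indices lo, hi on the list; the fuel argument only
-- makes the loop total — it never runs out, since hi - lo shrinks at every step)
def bisectGo (a : List Int) (x : Int) (fuel : Nat) (lo hi : Nat) : Nat :=
  match fuel with
  | 0 => lo
  | fuel + 1 =>
    if lo < hi then
      let mid := (lo + hi) / 2
      if x < a.getD mid 0 then bisectGo a x fuel lo mid
      else bisectGo a x fuel (mid + 1) hi
    else lo

def bisectRight (a : List Int) (x : Int) : Nat := bisectGo a x a.length 0 a.length

def detect_bound_alt (chainage : Int) : Option String :=
  if bisectRight xbPoints chainage % 2 == 1 then some "XB"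
  else if bisectRight bbPoints chainage % 2 == 1 then some "BB"
  else none

-- ===== PRECONDITION & SPEC =====
def Spec_detect_bound (chainage : Int) (out : Option String) : Prop := out = detect_bound_alt chainage
instance (chainage : Int) (out : Option String) : Decidable (Spec_detect_bound chainage out) := by unfold Spec_detect_bound; infer_instance

-- ===== CLAIM (what is proved, stated in full; the proofs are below) =====
def Claim_equal_detect_bound : Prop := ∀ (chainage : Int), Dom_detect_bound chainage → Spec_detect_bound chainage (detect_bound chainage)

-- ===== LEMMAS AND PROOFS =====

-- the merged disjoint intervals the boundary tables encode
def xbIntervals : List (Int × Int) := [(14696, 15160), (16090, 18032), (18383, 19426), (19609, 20734), (20917, 22449), (22698, 24234), (24757, 25406), (25658, 26571), (26837, 27690), (27934, 28473), (28773, 30138), (30590, 31642), (31903, 32206), (33037, 33632), (33996, 34791), (35068, 35856), (36029, 36452), (36792, 37053), (37242, 37767), (38194, 39223), (39468, 40021), (40316, 40952), (41180, 41497), (41660, 42911), (43066, 44508), (44836, 45561), (45832, 46650), (47527, 47624), (48249, 49604), (49874, 50859), (51174, 53496), (53649, 54216), (54684, 55580), (55794, 56431)]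
def bbIntervals : List (Int × Int) := [(14695, 15180), (16095, 18009), (18371, 19434), (19601, 20724), (20909, 22487), (22697, 24161), (24787, 25405), (25679, 27768), (27910, 28500), (28768, 30118), (30468, 31653), (31937, 32908), (33035, 33688), (33995, 34790), (35064, 35848), (36030, 36462), (36794, 37055), (37231, 37768), (38193, 39224), (39461, 40031), (40361, 40933), (41150, 41279), (41640, 42914), (43060, 44509), (44706, 45310), (45802, 46664), (47052, 47612), (48229, 49630), (49841, 50872), (51152, 53508), (53648, 54303), (54679, 55581), (56001, 56543)]

def pointsOf (ivs : List (Int × Int)) : List Int := ivs.flatMap (fun p => [p.1, p.2 + 1])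

def countLE (a : List Int) (x : Int) : Nat := a.countP (fun y => decide (y ≤ x))

lemma xbPoints_eq : xbPoints = pointsOf xbIntervals := by decide
lemma bbPoints_eq : bbPoints = pointsOf bbIntervals := by decide

lemma xbProper : ∀ p ∈ xbIntervals, p.1 ≤ p.2 := by decide
lemma bbProper : ∀ p ∈ bbIntervals, p.1 ≤ p.2 := by decide

set_option maxRecDepth 8000 in
lemma xbSorted : xbPoints.Pairwise (· ≤ ·) :=
  List.isChain_iff_pairwise.mp (by decide)
set_option maxRecDepth 8000 in
lemma bbSorted : bbPoints.Pairwise (· ≤ ·) :=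
  List.isChain_iff_pairwise.mp (by decide)

-- an IsChain of gaps on proper intervals is pairwise (kernel-cheap: linear decide)
lemma chain_disjoint_pairwise (l : List (Int × Int)) (hc : l.IsChain (fun p q => p.2 + 1 < q.1))
    (hp : ∀ p ∈ l, p.1 ≤ p.2) : l.Pairwise (fun p q => p.2 + 1 < q.1) := by
  induction l with
  | nil => simp
  | cons a t ih =>
    rw [List.isChain_cons] at hc
    have hpt := ih hc.2 (fun p hp' => hp p (List.mem_cons_of_mem _ hp'))
    refine List.pairwise_cons.mpr ⟨?_, hpt⟩
    cases t with
    | nil => intro q hq; simp at hq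
    | cons b t' =>
      have hab : a.2 + 1 < b.1 := hc.1 b rfl
      intro q hq
      rcases List.mem_cons.mp hq with rfl | hq'
      · exact hab
      · have hbq := (List.pairwise_cons.mp hpt).1 q hq'
        have hbb := hp b (by simp)
        omega

lemma xbDisjoint : xbIntervals.Pairwise (fun p q => p.2 + 1 < q.1) :=
  chain_disjoint_pairwise _ (by decide) xbProper
lemma bbDisjoint : bbIntervals.Pairwise (fun p q => p.2 + 1 < q.1) :=
  chain_disjoint_pairwise _ (by decide) bbProper

-- A's loop returns res exactly when some segment contains c
lemma loopRet_eq (segs : List (Int × Int × String)) (res : String) (c : Int) :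
    pyLoopRet segs res c =
      if ∃ t ∈ segs, t.1 ≤ c ∧ c ≤ t.2.1 then some res else none := by
  induction segs with
  | nil => simp [pyLoopRet]
  | cons p t ih =>
    obtain ⟨lo, hi, s⟩ := p
    simp only [pyLoopRet]
    by_cases h : lo ≤ c ∧ c ≤ hi
    · have hex : ∃ x ∈ (lo, hi, s) :: t, x.1 ≤ c ∧ c ≤ x.2.1 :=
        ⟨(lo, hi, s), List.mem_cons_self, h.1, h.2⟩
      rw [if_pos h, if_pos hex]
    · have hiff : (∃ x ∈ (lo, hi, s) :: t, x.1 ≤ c ∧ c ≤ x.2.1) ↔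
          (∃ x ∈ t, x.1 ≤ c ∧ c ≤ x.2.1) := by
        constructor
        · rintro ⟨x, hx, hx1, hx2⟩
          rcases List.mem_cons.mp hx with rfl | hxt
          · exact absurd ⟨hx1, hx2⟩ h
          · exact ⟨x, hxt, hx1, hx2⟩
        · rintro ⟨x, hx, hx1, hx2⟩
          exact ⟨x, List.mem_cons_of_mem _ hx, hx1, hx2⟩
      rw [if_neg h, ih]
      exact if_congr hiff.symm rfl rfl

-- raw segments and merged intervals cover the same chainages
lemma unionX (c : Int) :
    (∃ t ∈ pyXB_SEGMENTS, t.1 ≤ c ∧ c ≤ t.2.1) ↔ (∃ p ∈ xbIntervals, p.1 ≤ c ∧ c ≤ p.2) := by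
  simp only [pyXB_SEGMENTS, xbIntervals, List.mem_cons, List.not_mem_nil, or_false,
    exists_eq_or_imp, exists_eq_left]
  omega

lemma unionB (c : Int) :
    (∃ t ∈ pyBB_SEGMENTS, t.1 ≤ c ∧ c ≤ t.2.1) ↔ (∃ p ∈ bbIntervals, p.1 ≤ c ∧ c ≤ p.2) := by
  simp only [pyBB_SEGMENTS, bbIntervals, List.mem_cons, List.not_mem_nil, or_false,
    exists_eq_or_imp, exists_eq_left]
  omega

lemma A_char (c : Int) :
    detect_bound c =
      if ∃ p ∈ xbIntervals, p.1 ≤ c ∧ c ≤ p.2 then some "XB"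
      else if ∃ p ∈ bbIntervals, p.1 ≤ c ∧ c ≤ p.2 then some "BB"
      else none := by
  unfold detect_bound
  rw [loopRet_eq, loopRet_eq]
  simp only [unionX c, unionB c]
  split_ifs <;> rfl

-- prefix-count characterisation of a sorted list
lemma sorted_getD_iff (a : List Int) (x : Int) (hs : a.Pairwise (· ≤ ·)) :
    ∀ i, i < a.length → (a.getD i 0 ≤ x ↔ i < countLE a x) := by
  induction a with
  | nil => intro i hi; simp at hi
  | cons y t ih =>
    rw [List.pairwise_cons] at hs
    intro i hi
    have hcnt : countLE (y :: t) x = countLE t x + (if y ≤ x then 1 else 0) := by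
      simp [countLE, List.countP_cons]
    by_cases hy : y ≤ x
    · cases i with
      | zero => simp [hcnt, hy, List.getD]
      | succ j =>
        have hj : j < t.length := by simpa using hi
        have := ih hs.2 j hj
        simp only [List.getD_cons_succ, hcnt, if_pos hy]
        omega
    · have ht0 : countLE t x = 0 := by
        apply List.countP_eq_zero.mpr
        intro z hz
        have := hs.1 z hz
        simp only [decide_eq_true_eq]
        omega
      cases i with
      | zero =>
        simp only [List.getD_cons_zero, hcnt, ht0, if_neg hy]
        constructor
        · intro h; exact absurd h hy
        · intro h; omega
      | succ j =>
        have hj : j < t.length := by simpa using hi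
        have hIH := ih hs.2 j hj
        simp only [List.getD_cons_succ, hcnt, ht0, if_neg hy]
        rw [ht0] at hIH
        constructor
        · intro h; exact absurd ((hIH).mp h) (by omega)
        · intro h; omega

-- Source B's binary search finds the prefix count
lemma bisectGo_eq (a : List Int) (x : Int) (k : Nat) :
    ∀ (fuel lo hi : Nat), (∀ i, i < a.length → (a.getD i 0 ≤ x ↔ i < k)) →
      lo ≤ k → k ≤ hi → hi ≤ a.length → hi - lo ≤ fuel → bisectGo a x fuel lo hi = k := by
  intro fuel
  induction fuel with
  | zero => intro lo hi _ h1 h2 _ hf; simp only [bisectGo]; omega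
  | succ fuel ih =>
    intro lo hi hk h1 h2 h3 hf
    simp only [bisectGo]
    by_cases h : lo < hi
    · rw [if_pos h]
      have hmidlt : (lo + hi) / 2 < hi := by omega
      have hmidge : lo ≤ (lo + hi) / 2 := by omega
      have hmlen : (lo + hi) / 2 < a.length := by omega
      by_cases hc : x < a.getD ((lo + hi) / 2) 0
      · rw [if_pos hc]
        have hkmid : k ≤ (lo + hi) / 2 := by
          by_contra hcon
          have := (hk _ hmlen).mpr (by omega)
          omega
        exact ih lo ((lo + hi) / 2) hk h1 hkmid (by omega) (by omega)
      · rw [if_neg hc]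
        have hmidk : (lo + hi) / 2 < k := (hk _ hmlen).mp (by omega)
        exact ih ((lo + hi) / 2 + 1) hi hk (by omega) h2 h3 (by omega)
    · rw [if_neg h]
      omega

lemma bisectRight_eq (a : List Int) (x : Int) (hs : a.Pairwise (· ≤ ·)) :
    bisectRight a x = countLE a x := by
  unfold bisectRight
  exact bisectGo_eq a x (countLE a x) a.length 0 a.length (sorted_getD_iff a x hs)
    (Nat.zero_le _) (by simpa [countLE] using List.countP_le_length (l := a)) le_rfl (by omega)

-- auxiliary: no boundary of a later interval is ≤ c when c is below them all
lemma countLE_pointsOf_zero (ivs : List (Int × Int)) (c : Int)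
    (hall : ∀ p ∈ ivs, c < p.1) (hp : ∀ p ∈ ivs, p.1 ≤ p.2) :
    countLE (pointsOf ivs) c = 0 := by
  apply List.countP_eq_zero.mpr
  intro z hz
  simp only [pointsOf, List.mem_flatMap, List.mem_cons, List.not_mem_nil, or_false] at hz
  obtain ⟨p, hpmem, hzeq⟩ := hz
  have h1 := hall p hpmem
  have h2 := hp p hpmem
  simp only [decide_eq_true_eq]
  rcases hzeq with rfl | rfl <;> omega

-- parity of the prefix count decides interval membership
lemma parity_iff (ivs : List (Int × Int)) (c : Int)
    (hd : ivs.Pairwise (fun p q => p.2 + 1 < q.1)) (hp : ∀ p ∈ ivs, p.1 ≤ p.2) :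
    (countLE (pointsOf ivs) c % 2 = 1) ↔ (∃ p ∈ ivs, p.1 ≤ c ∧ c ≤ p.2) := by
  induction ivs with
  | nil => simp [pointsOf, countLE]
  | cons p t ih =>
    obtain ⟨lo, hi⟩ := p
    rw [List.pairwise_cons] at hd
    have hpt : ∀ q ∈ t, q.1 ≤ q.2 := fun q hq => hp q (List.mem_cons_of_mem _ hq)
    have hlohi : lo ≤ hi := hp (lo, hi) List.mem_cons_self
    have hsplit : countLE (pointsOf ((lo, hi) :: t)) c =
        countLE (pointsOf t) c + ((if lo ≤ c then 1 else 0) + (if hi + 1 ≤ c then 1 else 0)) := by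
      simp only [pointsOf, List.flatMap_cons, countLE, List.countP_append, List.countP_cons,
        List.countP_nil, decide_eq_true_eq]
      omega
    by_cases h1 : c < lo
    · have ht0 : countLE (pointsOf t) c = 0 :=
        countLE_pointsOf_zero t c (fun q hq => by have := hd.1 q hq; omega) hpt
      rw [hsplit, ht0, if_neg (by omega), if_neg (by omega)]
      simp only [List.mem_cons]
      constructor
      · omega
      · rintro ⟨q, hq, hq1, hq2⟩
        rcases hq with rfl | hqt
        · omega
        · have := hd.1 q hqt; omega
    · by_cases h2 : c ≤ hi
      · have ht0 : countLE (pointsOf t) c = 0 :=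
          countLE_pointsOf_zero t c (fun q hq => by have := hd.1 q hq; omega) hpt
        rw [hsplit, ht0, if_pos (by omega), if_neg (by omega)]
        simp only [List.mem_cons]
        constructor
        · intro _; exact ⟨(lo, hi), Or.inl rfl, by omega, h2⟩
        · intro _; simp
      · rw [hsplit, if_pos (by omega), if_pos (by omega)]
        have : (countLE (pointsOf t) c + (1 + 1)) % 2 = countLE (pointsOf t) c % 2 := by omega
        rw [this, ih hd.2 hpt]
        simp only [List.mem_cons]
        constructor
        · rintro ⟨q, hq, hq1, hq2⟩; exact ⟨q, Or.inr hq, hq1, hq2⟩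
        · rintro ⟨q, hq, hq1, hq2⟩
          rcases hq with rfl | hqt
          · omega
          · exact ⟨q, hqt, hq1, hq2⟩

lemma B_char (c : Int) :
    detect_bound_alt c =
      if ∃ p ∈ xbIntervals, p.1 ≤ c ∧ c ≤ p.2 then some "XB"
      else if ∃ p ∈ bbIntervals, p.1 ≤ c ∧ c ≤ p.2 then some "BB"
      else none := by
  unfold detect_bound_alt
  rw [bisectRight_eq xbPoints c xbSorted, bisectRight_eq bbPoints c bbSorted,
    xbPoints_eq, bbPoints_eq]
  have hx := parity_iff xbIntervals c xbDisjoint xbProper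
  have hb := parity_iff bbIntervals c bbDisjoint bbProper
  by_cases h1 : ∃ p ∈ xbIntervals, p.1 ≤ c ∧ c ≤ p.2
  · rw [if_pos h1]
    have : countLE (pointsOf xbIntervals) c % 2 = 1 := hx.mpr h1
    simp [this]
  · rw [if_neg h1]
    have hx0 : ¬ countLE (pointsOf xbIntervals) c % 2 = 1 := fun h => h1 (hx.mp h)
    by_cases h2 : ∃ p ∈ bbIntervals, p.1 ≤ c ∧ c ≤ p.2
    · rw [if_pos h2]
      have : countLE (pointsOf bbIntervals) c % 2 = 1 := hb.mpr h2
      simp [hx0, this]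
    · rw [if_neg h2]
      have hb0 : ¬ countLE (pointsOf bbIntervals) c % 2 = 1 := fun h => h2 (hb.mp h)
      simp [hx0, hb0]

-- ===== VERDICT (by name: the statement is the Claim_ definition above) =====
theorem detect_bound_spec : Claim_equal_detect_bound := by
  intro c _
  unfold Spec_detect_bound
  rw [A_char c, B_char c]
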